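-- pv_equiv track=rewrite | github.com/lsh23/algorithm-exercise | 이분탐색/휴게소세우기.py | solve
-- ===== SOURCE A (Python) =====
-- def put_rest_area(n: int, m: int, l: int, rest_area: list[int], min_dist: int) -> bool:
--     put_cnt: int = 0
--
--     prev: int = 0
--     for area in rest_area:
--         while area > prev + min_dist:
--             prev = prev + min_dist
--             put_cnt += 1
--         prev = area
--
--     while l - 1 >= prev + min_dist:
--         prev = prev + min_dist
--         put_cnt += 1
--
--     return put_cnt <= m
--
-- def solve(n: int, m: int, l: int, rest_area: list[int]) -> int:
--     rest_area.sort()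
--     left: int = 1
--     right: int = l - 1
--     ans: int = right
--     while left <= right:
--         mid = (left + right) // 2
--         if put_rest_area(n, m, l, rest_area, mid):
--             right = mid - 1
--             ans = min(mid, ans)
--         else:
--             left = mid + 1
--     return ans
-- ===== SOURCE B (Python) =====
-- def solve(n: int, m: int, l: int, rest_area: list[int]) -> int:
--     rest_area.sort()
--     # precompute the fixed gaps once; each candidate distance is then checked by division
--     gaps: list[int] = []
--     prev: int = 0
--     for a in rest_area:
--         if a - prev > 1:
--             gaps.append(a - prev)
--         prev = a
--     tail: int = l - 1 - prev
--
--     def fits(d: int) -> bool: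
--         cnt = sum((g - 1) // d for g in gaps)
--         if tail >= 0:
--             cnt += tail // d
--         return cnt <= m
--
--     lo: int = 1
--     hi: int = l - 1
--     ans: int = l - 1
--     while lo <= hi:
--         mid = (lo + hi) // 2
--         if fits(mid):
--             hi = mid - 1
--             ans = mid
--         else:
--             lo = mid + 1
--     return ans
-- ===== Notes on version B (the rewrite author's own statement) =====
-- stated objective: alternative
-- what changed: The feasibility check's per-step while loops are replaced by a one-time precomputation of the gaps between consecutive sorted areas and a single floor-division (gap-1)//d per gap, so each binary-search probe does arithmetic per gap instead of stepping distance by distance.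
import Mathlib
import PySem

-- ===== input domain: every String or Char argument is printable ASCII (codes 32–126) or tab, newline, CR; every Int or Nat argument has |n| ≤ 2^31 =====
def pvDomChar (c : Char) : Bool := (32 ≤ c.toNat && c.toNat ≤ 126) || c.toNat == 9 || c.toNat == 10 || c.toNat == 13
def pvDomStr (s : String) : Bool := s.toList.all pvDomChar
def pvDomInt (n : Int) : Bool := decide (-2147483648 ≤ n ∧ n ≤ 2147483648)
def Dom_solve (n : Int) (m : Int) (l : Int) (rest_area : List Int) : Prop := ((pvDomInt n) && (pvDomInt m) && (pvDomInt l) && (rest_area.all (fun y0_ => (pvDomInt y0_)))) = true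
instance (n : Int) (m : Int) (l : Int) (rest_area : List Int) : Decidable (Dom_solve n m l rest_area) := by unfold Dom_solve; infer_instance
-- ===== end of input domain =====

-- B replaces the per-step while loops of A's feasibility check by a one-pass precomputation of
-- the gaps and a floor-division count per gap (objective: alternative; note both A and B sort
-- rest_area in place in Python; the equivalence proved here is about the return value).

-- ===== PORT A =====
-- inner 'while area > prev + min_dist' loop; the '0 < min_dist' conjunct is only a totality
-- guard (Python diverges there; solve only ever calls with min_dist ≥ 1)
def putInner (min_dist area : Int) (prev cnt : Int) : Int × Int :=
  if _h : prev + min_dist < area ∧ 0 < min_dist then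
    putInner min_dist area (prev + min_dist) (cnt + 1)
  else (prev, cnt)
termination_by (area - prev).toNat
decreasing_by omega

-- trailing 'while l - 1 >= prev + min_dist' loop; same totality guard
def putTail (min_dist L : Int) (prev cnt : Int) : Int × Int :=
  if _h : prev + min_dist ≤ L ∧ 0 < min_dist then
    putTail min_dist L (prev + min_dist) (cnt + 1)
  else (prev, cnt)
termination_by (L - prev).toNat
decreasing_by omega

def put_rest_area (n m l : Int) (rest_area : List Int) (min_dist : Int) : Bool :=
  let st := rest_area.foldl (fun (s : Int × Int) area =>
    (area, (putInner min_dist area s.1 s.2).2)) (0, 0)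
  decide ((putTail min_dist (l - 1) st.1 st.2).2 ≤ m)

-- 'while left <= right' binary-search loop of A's solve
def solveLoopA (n m l : Int) (ra : List Int) (lo hi ans : Int) : Int :=
  if h : lo ≤ hi then
    let mid := PySem.Int.floordiv (lo + hi) 2
    if put_rest_area n m l ra mid then
      solveLoopA n m l ra lo (mid - 1) (min mid ans)
    else
      solveLoopA n m l ra (mid + 1) hi ans
  else ans
termination_by (hi + 1 - lo).toNat
decreasing_by
  · have := PySem.Int.floordiv_two_mid_bounds h; omega
  · have := PySem.Int.floordiv_two_mid_bounds h; omega

def solve (n : Int) (m : Int) (l : Int) (rest_area : List Int) : Int :=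
  let ra := PySem.List.sorted rest_area (fun x => x) false
  solveLoopA n m l ra 1 (l - 1) (l - 1)

-- ===== PORT B =====
-- one pass over the sorted areas: final prev and the list of gaps > 1
def gapsLoop (areas : List Int) : Int × List Int :=
  areas.foldl (fun (s : Int × List Int) a =>
    (a, if 1 < a - s.1 then s.2 ++ [a - s.1] else s.2)) (0, [])

def fitsB (m tail : Int) (gaps : List Int) (d : Int) : Bool :=
  let cnt := (gaps.map (fun g => PySem.Int.floordiv (g - 1) d)).sum
  let cnt := if 0 ≤ tail then cnt + PySem.Int.floordiv tail d else cnt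
  decide (cnt ≤ m)

def solveLoopB (m tail : Int) (gaps : List Int) (lo hi ans : Int) : Int :=
  if h : lo ≤ hi then
    let mid := PySem.Int.floordiv (lo + hi) 2
    if fitsB m tail gaps mid then
      solveLoopB m tail gaps lo (mid - 1) mid
    else
      solveLoopB m tail gaps (mid + 1) hi ans
  else ans
termination_by (hi + 1 - lo).toNat
decreasing_by
  · have := PySem.Int.floordiv_two_mid_bounds h; omega
  · have := PySem.Int.floordiv_two_mid_bounds h; omega

def solve_alt (n : Int) (m : Int) (l : Int) (rest_area : List Int) : Int :=
  let ra := PySem.List.sorted rest_area (fun x => x) false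
  let s := gapsLoop ra
  solveLoopB m (l - 1 - s.1) s.2 1 (l - 1) (l - 1)

-- ===== PRECONDITION & SPEC =====
def Spec_solve (n : Int) (m : Int) (l : Int) (rest_area : List Int) (out : Int) : Prop := out = solve_alt n m l rest_area
instance (n : Int) (m : Int) (l : Int) (rest_area : List Int) (out : Int) : Decidable (Spec_solve n m l rest_area out) := by unfold Spec_solve; infer_instance

-- ===== CLAIM (what is proved, stated in full; the proofs are below) =====
def Claim_equal_solve : Prop := ∀ (n : Int) (m : Int) (l : Int) (rest_area : List Int), Dom_solve n m l rest_area → Spec_solve n m l rest_area (solve n m l rest_area)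

-- ===== LEMMAS AND PROOFS =====

-- floor-division facts (variable positive divisor)
lemma fdiv_nonneg_of_nonneg {x d : Int} (hd : 0 < d) (hx : 0 ≤ x) :
    0 ≤ PySem.Int.floordiv x d := by
  have := (PySem.Int.le_floordiv_iff_mul_le (q := 0) (a := x) hd).mpr (by simpa using hx)
  exact this

lemma fdiv_nonpos_of_lt {x d : Int} (hd : 0 < d) (hx : x < d) :
    PySem.Int.floordiv x d ≤ 0 := by
  have := (PySem.Int.floordiv_lt_iff_lt_mul (q := 1) (a := x) hd).mpr (by simpa using hx)
  omega

lemma fdiv_step {x d : Int} (hd : 0 < d) :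
    PySem.Int.floordiv x d = PySem.Int.floordiv (x - d) d + 1 := by
  set q := PySem.Int.floordiv (x - d) d with hq
  have h1 : q * d ≤ x - d := (PySem.Int.le_floordiv_iff_mul_le hd).mp (le_of_eq hq.symm)
  have h2 : x - d < (q + 1) * d := (PySem.Int.floordiv_lt_iff_lt_mul hd).mp (by omega)
  rw [PySem.Int.floordiv_eq_iff_of_pos hd]
  constructor <;> nlinarith

-- the inner while loop counts max 0 ⌊(area - prev - 1) / d⌋ steps
lemma putInner_snd (d a : Int) (hd : 0 < d) : ∀ prev cnt,
    (putInner d a prev cnt).2 = cnt + max 0 (PySem.Int.floordiv (a - prev - 1) d) := by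
  intro prev cnt
  induction prev, cnt using putInner.induct (min_dist := d) (area := a) with
  | case1 prev cnt h ih =>
    rw [putInner, dif_pos h, ih]
    have hge : d ≤ a - prev - 1 := by omega
    have h0 : 0 ≤ PySem.Int.floordiv (a - (prev + d) - 1) d :=
      fdiv_nonneg_of_nonneg hd (by omega)
    have hstep : PySem.Int.floordiv (a - prev - 1) d
        = PySem.Int.floordiv (a - (prev + d) - 1) d + 1 := by
      have := fdiv_step (x := a - prev - 1) hd
      simpa [show a - prev - 1 - d = a - (prev + d) - 1 by ring] using this
    omega
  | case2 prev cnt h =>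
    rw [putInner, dif_neg h]
    rcases not_and_or.mp h with h' | h'
    · have : PySem.Int.floordiv (a - prev - 1) d ≤ 0 := fdiv_nonpos_of_lt hd (by omega)
      simp; omega
    · omega

-- the trailing while loop counts max 0 ⌊(L - prev) / d⌋ steps
lemma putTail_snd (d L : Int) (hd : 0 < d) : ∀ prev cnt,
    (putTail d L prev cnt).2 = cnt + max 0 (PySem.Int.floordiv (L - prev) d) := by
  intro prev cnt
  induction prev, cnt using putTail.induct (min_dist := d) (L := L) with
  | case1 prev cnt h ih =>
    rw [putTail, dif_pos h, ih]
    have h0 : 0 ≤ PySem.Int.floordiv (L - (prev + d)) d :=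
      fdiv_nonneg_of_nonneg hd (by omega)
    have hstep : PySem.Int.floordiv (L - prev) d
        = PySem.Int.floordiv (L - (prev + d)) d + 1 := by
      have := fdiv_step (x := L - prev) hd
      simpa [show L - prev - d = L - (prev + d) by ring] using this
    omega
  | case2 prev cnt h =>
    rw [putTail, dif_neg h]
    rcases not_and_or.mp h with h' | h'
    · have : PySem.Int.floordiv (L - prev) d ≤ 0 := fdiv_nonpos_of_lt hd (by omega)
      simp; omega
    · omega

-- B's gaps accumulator distributes over its initial value
lemma gapsFold_acc (areas : List Int) : ∀ prev gs,
    (areas.foldl (fun (s : Int × List Int) a =>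
      (a, if 1 < a - s.1 then s.2 ++ [a - s.1] else s.2)) (prev, gs))
    = ((areas.foldl (fun (s : Int × List Int) a =>
        (a, if 1 < a - s.1 then s.2 ++ [a - s.1] else s.2)) (prev, [])).1,
       gs ++ (areas.foldl (fun (s : Int × List Int) a =>
        (a, if 1 < a - s.1 then s.2 ++ [a - s.1] else s.2)) (prev, [])).2) := by
  induction areas with
  | nil => intro prev gs; simp [List.foldl]
  | cons a t ih =>
    intro prev gs
    simp only [List.foldl]
    by_cases h : 1 < a - prev
    · simp only [if_pos h, List.nil_append]
      rw [ih a (gs ++ [a - prev]), ih a [a - prev]]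
      simp
    · simp only [if_neg h]
      rw [ih a gs]

-- A's fold over the areas equals B's: same final prev, and the count is the sum of
-- per-gap floor divisions
lemma fold_eq (d : Int) (hd : 0 < d) (areas : List Int) : ∀ prev cnt,
    (areas.foldl (fun (s : Int × Int) a =>
      (a, (putInner d a s.1 s.2).2)) (prev, cnt))
    = ((areas.foldl (fun (s : Int × List Int) a =>
        (a, if 1 < a - s.1 then s.2 ++ [a - s.1] else s.2)) (prev, [])).1,
       cnt + ((areas.foldl (fun (s : Int × List Int) a =>
        (a, if 1 < a - s.1 then s.2 ++ [a - s.1] else s.2)) (prev, [])).2.map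
          (fun g => PySem.Int.floordiv (g - 1) d)).sum) := by
  induction areas with
  | nil => intro prev cnt; simp [List.foldl]
  | cons a t ih =>
    intro prev cnt
    simp only [List.foldl]
    rw [putInner_snd d a hd, ih]
    by_cases hgap : 1 < a - prev
    · simp only [if_pos hgap, List.nil_append]
      rw [gapsFold_acc t a [a - prev]]
      have h0 : 0 ≤ PySem.Int.floordiv (a - prev - 1) d :=
        fdiv_nonneg_of_nonneg hd (by omega)
      simp only [List.map_append, List.sum_append, List.map_cons, List.map_nil,
        List.sum_cons, List.sum_nil, Prod.mk.injEq]
      exact ⟨trivial, by omega⟩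
    · simp only [if_neg hgap]
      have h0 : PySem.Int.floordiv (a - prev - 1) d ≤ 0 :=
        fdiv_nonpos_of_lt hd (by omega)
      simp only [Prod.mk.injEq]
      exact ⟨trivial, by omega⟩

-- the two feasibility checks agree for every candidate distance d ≥ 1
lemma check_eq (n m l : Int) (ra : List Int) (d : Int) (hd : 0 < d) :
    put_rest_area n m l ra d = fitsB m (l - 1 - (gapsLoop ra).1) (gapsLoop ra).2 d := by
  simp only [put_rest_area, fitsB, gapsLoop, fold_eq d hd, putTail_snd _ _ hd]
  set p := (ra.foldl (fun (s : Int × List Int) a =>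
    (a, if 1 < a - s.1 then s.2 ++ [a - s.1] else s.2)) (0, [])).1 with hp
  by_cases ht : 0 ≤ l - 1 - p
  · have h0 : 0 ≤ PySem.Int.floordiv (l - 1 - p) d := fdiv_nonneg_of_nonneg hd ht
    simp only [ht, if_pos]
    rw [decide_eq_decide]
    omega
  · have h0 : PySem.Int.floordiv (l - 1 - p) d ≤ 0 := fdiv_nonpos_of_lt hd (by omega)
    simp only [ht, if_neg, not_false_iff]
    rw [decide_eq_decide]
    omega

-- the two binary-search loops agree, given 1 ≤ lo and hi ≤ ans
lemma loop_eq (n m l : Int) (ra : List Int) :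
    ∀ k lo hi ans, (hi + 1 - lo).toNat = k → 1 ≤ lo → hi ≤ ans →
    solveLoopA n m l ra lo hi ans
      = solveLoopB m (l - 1 - (gapsLoop ra).1) (gapsLoop ra).2 lo hi ans := by
  intro k
  induction k using Nat.strong_induction_on with
  | _ k ih =>
    intro lo hi ans hk hlo hans
    rw [solveLoopA, solveLoopB]
    by_cases h : lo ≤ hi
    · simp only [dif_pos h]
      have hmid := PySem.Int.floordiv_two_mid_bounds h
      set mid := PySem.Int.floordiv (lo + hi) 2 with hm
      rw [check_eq n m l ra mid (by omega)]
      by_cases hc : fitsB m (l - 1 - (gapsLoop ra).1) (gapsLoop ra).2 mid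
      · simp only [hc, if_pos]
        have : min mid ans = mid := min_eq_left (by omega)
        rw [this]
        exact ih _ (by omega) lo (mid - 1) mid rfl hlo (by omega)
      · simp only [hc, if_neg, Bool.false_eq_true, not_false_iff]
        exact ih _ (by omega) (mid + 1) hi ans rfl (by omega) hans
    · simp [h]

-- ===== VERDICT (by name: the statement is the Claim_ definition above) =====
theorem solve_spec : Claim_equal_solve := by
  intro n m l rest_area _
  unfold Spec_solve solve solve_alt
  exact loop_eq n m l _ _ 1 (l - 1) (l - 1) rfl le_rfl le_rfl
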